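-- pv_equiv track=rewrite | github.com/tlambert03/fpbase2 | src/fpbase2/core/utils.py | can_modify_database
-- ===== SOURCE A (Python) =====
-- MODIFYING_KEYWORDS: dict[str, list[str]] = {
--     "alter": ["table"],
--     "create": ["database", "table", "index", "view"],
--     "delete": [],
--     "grant": [],
--     "revoke": [],
--     "commit": [],
--     "rollback": [],
--     "savepoint": [],
--     "drop": ["database", "index", "table"],
--     "insert": ["into"],
--     "truncate": ["table"],
--     "update": [],
-- }
--
-- def can_modify_database(statement: str) -> bool:
--     """Return True if a SQL statement can potentially modify the database."""
--     statement = statement.lower().strip()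
--
--     # Split the statement into words to analyze context
--     words = statement.split()
--
--     # Iterate through each part of the statement to check for modifying keywords
--     for i, word in enumerate(words):
--         if word in MODIFYING_KEYWORDS:
--             # If the keyword does not require specific context,
--             # it's a modifying statement
--             if not (contexts := MODIFYING_KEYWORDS[word]):
--                 return True
--
--             # If the keyword has specific contexts,
--             # check the next part of the statement for these contexts
--             if i + 1 < len(words) and words[i + 1] in contexts:
--                 return True
--
--     return False
-- ===== SOURCE B (Python) =====
-- _PHRASES = (
--     " delete ", " grant ", " revoke ", " commit ", " rollback ", " savepoint ", " update ",
--     " alter table ",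
--     " create database ", " create table ", " create index ", " create view ",
--     " drop database ", " drop index ", " drop table ",
--     " insert into ",
--     " truncate table ",
-- )
--
-- def can_modify_database(statement: str) -> bool:
--     """Return True if a SQL statement can potentially modify the database."""
--     text = " " + " ".join(statement.lower().strip().split()) + " "
--     return any(p in text for p in _PHRASES)
-- ===== Notes on version B (the rewrite author's own statement) =====
-- stated objective: alternative
-- what changed: B normalizes the statement to a single-spaced, space-padded lowercase string and does a substring search for 17 precomputed literal phrases (' delete ', ' alter table ', ...), replacing A's indexed token-by-token scan over a keyword dict with per-keyword context lists.
import Mathlib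
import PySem

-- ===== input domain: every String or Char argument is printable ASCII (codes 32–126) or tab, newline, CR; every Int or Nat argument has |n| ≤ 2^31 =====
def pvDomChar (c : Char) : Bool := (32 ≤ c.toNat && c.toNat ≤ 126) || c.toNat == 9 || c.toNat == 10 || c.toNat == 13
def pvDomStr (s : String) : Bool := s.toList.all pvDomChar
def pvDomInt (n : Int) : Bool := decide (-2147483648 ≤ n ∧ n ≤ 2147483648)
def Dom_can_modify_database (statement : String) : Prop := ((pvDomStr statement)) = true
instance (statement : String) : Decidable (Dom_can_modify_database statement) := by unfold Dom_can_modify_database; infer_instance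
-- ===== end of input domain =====

-- B normalizes the statement to a single-spaced, space-padded string and searches it for 17
-- literal modifying phrases as substrings, instead of A's indexed token scan over a keyword
-- dict with context lists; objective: alternative algorithm, same result.

-- ===== PORT A =====
def MODIFYING_KEYWORDS : PySem.Dict String (List String) :=
  PySem.Dict.mk
    [("alter", ["table"]),
     ("create", ["database", "table", "index", "view"]),
     ("delete", []),
     ("grant", []),
     ("revoke", []),
     ("commit", []),
     ("rollback", []),
     ("savepoint", []),
     ("drop", ["database", "index", "table"]),
     ("insert", ["into"]),
     ("truncate", ["table"]),
     ("update", [])]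

-- the 'for i, word in enumerate(words): …' loop with its early returns
def canLoopA (words : List String) : List (Int × String) → Bool
  | [] => false
  | (i, word) :: rest =>
    match PySem.Dict.get? MODIFYING_KEYWORDS word with
    | none => canLoopA words rest
    | some contexts =>
      if contexts.isEmpty then true
      else if decide (i + 1 < PySem.List.len words) && contexts.contains (PySem.List.pyGetD words (i + 1) "") then true
      else canLoopA words rest

def can_modify_database (statement : String) : Bool :=
  let words := PySem.Str.split₀ (PySem.Str.strip (PySem.Str.lower statement))
  canLoopA words (PySem.List.enumerate words 0)

-- ===== PORT B =====
def modPhrases : List String :=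
  [" delete ", " grant ", " revoke ", " commit ", " rollback ", " savepoint ", " update ",
   " alter table ",
   " create database ", " create table ", " create index ", " create view ",
   " drop database ", " drop index ", " drop table ",
   " insert into ",
   " truncate table "]

def can_modify_database_alt (statement : String) : Bool :=
  let text := " " ++ PySem.Str.join " " (PySem.Str.split₀ (PySem.Str.strip (PySem.Str.lower statement))) ++ " "
  modPhrases.any (fun p => PySem.Str.isIn p text)

-- ===== PRECONDITION & SPEC =====
def Spec_can_modify_database (statement : String) (out : Bool) : Prop := out = can_modify_database_alt statement
instance (statement : String) (out : Bool) : Decidable (Spec_can_modify_database statement out) := by unfold Spec_can_modify_database; infer_instance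

-- ===== CLAIM (what is proved, stated in full; the proofs are below) =====
def Claim_equal_can_modify_database : Prop := ∀ (statement : String), Dom_can_modify_database statement → Spec_can_modify_database statement (can_modify_database statement)

-- ===== LEMMAS AND PROOFS =====

-- ---- shared intermediate: the keyword table as flat sets, and an existence predicate ----
def bareKeywords : PySem.Set String :=
  PySem.Set.ofList ["delete", "grant", "revoke", "commit", "rollback", "savepoint", "update"]

def pairKeywords : PySem.Set (String × String) :=
  PySem.Set.ofList
    [("alter", "table"),
     ("create", "database"), ("create", "table"), ("create", "index"), ("create", "view"),
     ("drop", "database"), ("drop", "index"), ("drop", "table"),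
     ("insert", "into"),
     ("truncate", "table")]

def pairsAny (xs : List String) : Bool :=
  (xs.zip (xs.drop 1 ++ [""])).any (fun p => bareKeywords.contains p.1 || pairKeywords.contains p)

lemma pairsAny_cons (w : String) (t : List String) :
    pairsAny (w :: t) =
      ((bareKeywords.contains w || pairKeywords.contains (w, t.headD "")) || pairsAny t) := by
  cases t <;> simp [pairsAny]

-- ---- A's side: the enumerate loop equals pairsAny (per-word dict consultation flattened) ----
set_option maxHeartbeats 1000000 in
lemma step_eq (w nxt : String) :
    (bareKeywords.contains w || pairKeywords.contains (w, nxt)) =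
    (match PySem.Dict.get? MODIFYING_KEYWORDS w with
     | none => false
     | some ctxs => ctxs.isEmpty || ctxs.contains nxt) := by
  simp only [ MODIFYING_KEYWORDS, PySem.Dict.get?_mk_cons, beq_iff_eq]
  split_ifs with h1 h2 h3 h4 h5 h6 h7 h8 h9 h10 h11 h12 <;>
    first
      | (subst_vars; simp [bareKeywords, pairKeywords, PySem.Set.ofList]; done)
      | (simp [bareKeywords, pairKeywords, PySem.Set.ofList, Ne.symm h1, Ne.symm h2,
          Ne.symm h3, Ne.symm h4, Ne.symm h5, Ne.symm h6, Ne.symm h7, Ne.symm h8,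
          Ne.symm h9, Ne.symm h10, Ne.symm h11, Ne.symm h12, PySem.Dict.get?])

-- no context list of A's dict contains the empty word
set_option maxHeartbeats 1000000 in
lemma ctxs_no_empty (w : String) (ctxs : List String)
    (h : PySem.Dict.get? MODIFYING_KEYWORDS w = some ctxs) : ctxs.contains "" = false := by
  simp only [ MODIFYING_KEYWORDS, PySem.Dict.get?_mk_cons, beq_iff_eq] at h
  split_ifs at h <;> simp_all [PySem.Dict.get?] <;> (subst h; decide)

set_option maxHeartbeats 1000000 in
set_option maxRecDepth 4096 in
lemma loop_eq (ws : List String) : ∀ (suf : List String) (k : Nat), ws.drop k = suf →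
    canLoopA ws (PySem.List.enumerate suf (k : Int)) = pairsAny suf := by
  intro suf
  induction suf with
  | nil => intro k _; simp [canLoopA, pairsAny, PySem.List.enumerate_nil]
  | cons w t ih =>
    intro k hk
    have hkt : ws.drop (k + 1) = t := by rw [← List.tail_drop, hk]; rfl
    have hlen' : ws.length - k = t.length + 1 := by
      have := congrArg List.length hk; simpa using this
    have hk_le : k < ws.length := by
      by_contra hcon
      have hnil : ws.drop k = [] := List.drop_eq_nil_of_le (by omega)
      rw [hnil] at hk; simp at hk
    have hlen : ws.length = k + t.length + 1 := by omega
    have hcast : (k : Int) + 1 = ((k + 1 : Nat) : Int) := by push_cast; ring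
    rw [PySem.List.enumerate_cons, pairsAny_cons, canLoopA]
    rw [step_eq w (t.headD "")]
    cases hget : PySem.Dict.get? MODIFYING_KEYWORDS w with
    | none =>
      simp only [hcast, ih (k + 1) hkt, Bool.false_or]
    | some ctxs =>
      by_cases hemp : ctxs.isEmpty = true
      · simp [hemp]
      · cases t with
        | nil =>
          have hlen0 : ws.length = k + 1 := by simpa using hlen
          have hdec : (decide ((k : Int) + 1 < PySem.List.len ws)) = false := by
            apply decide_eq_false
            rw [PySem.List.len_eq, hlen0]; push_cast; omega
          simp only [List.headD_nil]
          rw [if_neg hemp, hdec, Bool.false_and]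
          simp only [Bool.false_eq_true, if_false]
          rw [hcast, ih (k + 1) hkt]
          have hne := ctxs_no_empty w ctxs hget
          simp only [Bool.not_eq_true] at hemp
          simp [pairsAny, hemp]
          simpa using hne
        | cons n t' =>
          have hdec : (decide ((k : Int) + 1 < PySem.List.len ws)) = true := by
            apply decide_eq_true
            rw [PySem.List.len_eq]
            simp only [List.length_cons] at hlen
            rw [hlen]; push_cast; omega
          have hnth : PySem.List.pyGetD ws ((k : Int) + 1) "" = n := by
            rw [hcast, PySem.List.pyGetD_natCast]
            have hsome : ws[k + 1]? = some n := by
              have h0 : (ws.drop (k + 1))[0]? = some n := by rw [hkt]; rfl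
              simpa [List.getElem?_drop] using h0
            simp [List.getD, hsome]
          simp only [List.headD_cons]
          rw [if_neg hemp, hdec, hnth, Bool.true_and]
          simp only [Bool.not_eq_true] at hemp
          cases hcn : ctxs.contains n with
          | true => simp
          | false =>
            simp only [Bool.false_eq_true, if_false]
            rw [hcast, ih (k + 1) hkt]
            simp [hemp]

-- ---- B's side: substring occurrence in the padded single-spaced join = token membership ----

-- good tokens: nonempty, no whitespace character (what split() produces)
def goodTok (w : List Char) : Prop := w ≠ [] ∧ ∀ c ∈ w, PySem.Chars.isspace c = false

lemma goodTok_no_space {w : List Char} (h : goodTok w) : ' ' ∉ w := by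
  intro hmem
  have := h.2 ' ' hmem
  simp [PySem.Chars.isspace] at this

lemma split₀_go_good : ∀ (s cur : List Char) (acc : List (List Char)),
    (∀ c ∈ cur, PySem.Chars.isspace c = false) → (∀ w ∈ acc, goodTok w) →
    ∀ w ∈ PySem.Chars.split₀.go s cur acc, goodTok w := by
  intro s
  induction s with
  | nil =>
    intro cur acc hcur hacc w hw
    by_cases hemp : cur.isEmpty = true
    · simp only [PySem.Chars.split₀.go, hemp, if_true] at hw
      exact hacc w (List.mem_reverse.mp hw)
    · simp only [PySem.Chars.split₀.go, hemp] at hw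
      rcases List.mem_cons.mp (List.mem_reverse.mp hw) with hw | hw
      · subst hw
        refine ⟨by simpa [List.isEmpty_iff] using hemp, ?_⟩
        intro c hc; exact hcur c (List.mem_reverse.mp hc)
      · exact hacc w hw
  | cons c rest ih =>
    intro cur acc hcur hacc w hw
    by_cases hsp : PySem.Chars.isspace c = true
    · by_cases hemp : cur.isEmpty = true
      · simp only [PySem.Chars.split₀.go, hsp, hemp, if_true] at hw
        exact ih [] acc (by simp) hacc w hw
      · simp only [PySem.Chars.split₀.go, hsp, hemp, if_true] at hw
        refine ih [] (cur.reverse :: acc) (by simp) ?_ w hw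
        intro u hu
        rcases List.mem_cons.mp hu with hu | hu
        · subst hu
          refine ⟨by simpa [List.isEmpty_iff] using hemp, ?_⟩
          intro d hd; exact hcur d (List.mem_reverse.mp hd)
        · exact hacc u hu
    · simp only [PySem.Chars.split₀.go, hsp] at hw
      refine ih (c :: cur) acc ?_ hacc w hw
      intro d hd
      rcases List.mem_cons.mp hd with hd | hd
      · subst hd; simpa using hsp
      · exact hcur d hd

lemma split₀_good (s : List Char) : ∀ w ∈ PySem.Chars.split₀ s, goodTok w := by
  intro w hw
  exact split₀_go_good s [] [] (by simp) (by simp) w hw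

-- each token followed by exactly one space
def uJoin : List (List Char) → List Char
  | [] => []
  | w :: t => w ++ ' ' :: uJoin t

lemma join_pad (ws : List (List Char)) (h : ws ≠ []) :
    PySem.Chars.join [' '] ws ++ [' '] = uJoin ws := by
  induction ws with
  | nil => simp at h
  | cons w t ih =>
    cases t with
    | nil => simp [PySem.Chars.join_singleton, uJoin]
    | cons v t' =>
      rw [PySem.Chars.join_cons_cons, List.append_assoc, List.append_assoc, ih (by simp)]
      simp [uJoin]

-- a prefix that is a space-free token followed by a space pins down the first token
lemma prefix_tok : ∀ (x w r s : List Char), ' ' ∉ x → ' ' ∉ w →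
    x ++ ' ' :: r <+: w ++ ' ' :: s → x = w ∧ r <+: s := by
  intro x
  induction x with
  | nil =>
    intro w r s _ hw h
    cases w with
    | nil => simpa [List.cons_prefix_cons] using h
    | cons b w' =>
      exfalso
      simp only [List.nil_append, List.cons_append, List.cons_prefix_cons] at h
      exact hw (by simp [← h.1])
  | cons a x' ih =>
    intro w r s hx hw h
    cases w with
    | nil =>
      exfalso
      simp only [List.cons_append, List.nil_append, List.cons_prefix_cons] at h
      exact hx (by simp [h.1])
    | cons b w' =>
      simp only [List.cons_append, List.cons_prefix_cons] at h
      obtain ⟨hab, h'⟩ := h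
      obtain ⟨h1, h2⟩ := ih w' r s (fun hm => hx (List.mem_cons_of_mem _ hm))
        (fun hm => hw (List.mem_cons_of_mem _ hm)) h'
      exact ⟨by rw [hab, h1], h2⟩

-- an infix starting with a character absent from w must lie in the right part
lemma skip_head : ∀ (w : List Char) (c : Char) (q l : List Char), c ∉ w →
    (c :: q) <:+: (w ++ l) → (c :: q) <:+: l := by
  intro w
  induction w with
  | nil => intro c q l _ h; simpa using h
  | cons a w' ih =>
    intro c q l hc h
    rcases List.infix_cons_iff.mp (by simpa using h) with hp | hi
    · exfalso
      rw [List.cons_prefix_cons] at hp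
      exact hc (by simp [hp.1])
    · exact ih c q l (fun hm => hc (List.mem_cons_of_mem _ hm)) hi

lemma one_tok_infix (x : List Char) (hxs : ' ' ∉ x) :
    ∀ (ws : List (List Char)), (∀ w ∈ ws, goodTok w) →
      ((' ' :: x ++ [' ']) <:+: (' ' :: uJoin ws) ↔ x ∈ ws) := by
  intro ws
  induction ws with
  | nil =>
    intro _
    constructor
    · intro h
      have := h.length_le
      simp [uJoin] at this
    · intro h; simp at h
  | cons w t ih =>
    intro hgood
    have hw := hgood w (List.mem_cons_self)
    have hts : ∀ u ∈ t, goodTok u := fun u hu => hgood u (List.mem_cons_of_mem _ hu)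
    have hexp : (' ' :: uJoin (w :: t)) = (' ' :: w) ++ (' ' :: uJoin t) := by
      simp [uJoin]
    constructor
    · intro h
      rw [hexp] at h
      rcases List.infix_cons_iff.mp (by simpa using h) with hp | hi
      · simp only [List.cons_prefix_cons, true_and] at hp
        have := prefix_tok x w [] (uJoin t) hxs (goodTok_no_space hw) hp
        exact this.1 ▸ List.mem_cons_self
      · have := skip_head w ' ' (x ++ [' ']) (' ' :: uJoin t) (goodTok_no_space hw) hi
        exact List.mem_cons_of_mem _ ((ih hts).mp this)
    · intro hmem
      rcases List.mem_cons.mp hmem with hmem | hmem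
      · subst hmem
        apply List.IsPrefix.isInfix
        simp only [uJoin, List.cons_append, List.cons_prefix_cons, true_and]
        exact (List.prefix_append_right_inj x).mpr
          (List.cons_prefix_cons.mpr ⟨rfl, List.nil_prefix⟩)
      · have h1 : (' ' :: x ++ [' ']) <:+: (' ' :: uJoin t) := (ih hts).mpr hmem
        have h2 : (' ' :: uJoin t) <:+: (' ' :: uJoin (w :: t)) := by
          rw [hexp]
          exact (List.suffix_append (' ' :: w) (' ' :: uJoin t)).isInfix
        exact h1.trans h2

lemma two_tok_infix (x y : List Char) (hxs : ' ' ∉ x) (hys : ' ' ∉ y) :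
    ∀ (ws : List (List Char)), (∀ w ∈ ws, goodTok w) →
      ((' ' :: x ++ ' ' :: y ++ [' ']) <:+: (' ' :: uJoin ws) ↔ (x, y) ∈ ws.zip ws.tail) := by
  intro ws
  induction ws with
  | nil =>
    intro _
    constructor
    · intro h
      have := h.length_le
      simp [uJoin] at this
    · intro h; simp at h
  | cons w t ih =>
    intro hgood
    have hw := hgood w (List.mem_cons_self)
    have hts : ∀ u ∈ t, goodTok u := fun u hu => hgood u (List.mem_cons_of_mem _ hu)
    have hexp : (' ' :: uJoin (w :: t)) = (' ' :: w) ++ (' ' :: uJoin t) := by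
      simp [uJoin]
    constructor
    · intro h
      rw [hexp] at h
      rcases List.infix_cons_iff.mp (by simpa using h) with hp | hi
      · simp only [List.cons_prefix_cons, true_and] at hp
        have h1 := prefix_tok x w (y ++ [' ']) (uJoin t) hxs (goodTok_no_space hw) hp
        cases t with
        | nil =>
          exfalso
          have := h1.2.length_le
          simp [uJoin] at this
        | cons v t' =>
          have hv := hts v (List.mem_cons_self)
          have h2 : y ++ [' '] <+: v ++ ' ' :: uJoin t' := by
            simpa [uJoin] using h1.2
          have h3 := prefix_tok y v [] (uJoin t') hys (goodTok_no_space hv) h2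
          rw [List.tail_cons, List.zip_cons_cons]
          exact List.mem_cons.mpr (Or.inl (by rw [h1.1, h3.1]))
      · have hskip := skip_head w ' ' (x ++ ' ' :: y ++ [' ']) (' ' :: uJoin t)
          (goodTok_no_space hw) (by simpa using hi)
        have hmem := (ih hts).mp (by simpa using hskip)
        cases t with
        | nil => simp at hmem
        | cons v t' =>
          rw [List.tail_cons, List.zip_cons_cons]
          exact List.mem_cons_of_mem _ (by simpa using hmem)
    · intro hmem
      cases t with
      | nil => simp at hmem
      | cons v t' =>
        rw [List.tail_cons, List.zip_cons_cons] at hmem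
        rcases List.mem_cons.mp hmem with hmem | hmem
        · simp only [Prod.mk.injEq] at hmem
          obtain ⟨rfl, rfl⟩ := hmem
          apply List.IsPrefix.isInfix
          simp only [uJoin, List.cons_append, List.cons_prefix_cons, true_and]
          simp [List.prefix_append_right_inj, List.cons_prefix_cons]
        · have h1 : (' ' :: x ++ ' ' :: y ++ [' ']) <:+: (' ' :: uJoin (v :: t')) :=
            (ih hts).mpr (by simpa using hmem)
          have h2 : (' ' :: uJoin (v :: t')) <:+: (' ' :: uJoin (w :: v :: t')) := by
            rw [hexp]
            exact (List.suffix_append (' ' :: w) _).isInfix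
          exact h1.trans h2

-- ---- pairsAny as an existence statement ----
lemma pair_no_empty (w : String) : (w, "") ∉ pairKeywords := by
  simp [pairKeywords, PySem.Set.ofList]

lemma pairsAny_iff : ∀ (ws : List String),
    pairsAny ws = true ↔
      ((∃ w ∈ ws, bareKeywords.contains w = true) ∨
       (∃ p ∈ ws.zip ws.tail, pairKeywords.contains p = true)) := by
  intro ws
  induction ws with
  | nil => simp [pairsAny]
  | cons w t ih =>
    rw [pairsAny_cons]
    cases t with
    | nil =>
      simp [pairsAny, pair_no_empty]
    | cons v t' =>
      simp only [List.headD_cons, Bool.or_eq_true, ih, List.tail_cons, List.zip_cons_cons]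
      constructor
      · rintro ((h | h) | (⟨u, hu, hc⟩ | ⟨p, hp, hc⟩))
        · exact Or.inl ⟨w, List.mem_cons_self, h⟩
        · exact Or.inr ⟨(w, v), List.mem_cons_self, h⟩
        · exact Or.inl ⟨u, List.mem_cons_of_mem _ hu, hc⟩
        · exact Or.inr ⟨p, List.mem_cons_of_mem _ hp, hc⟩
      · rintro (⟨u, hu, hc⟩ | ⟨p, hp, hc⟩)
        · rcases List.mem_cons.mp hu with h | h
          · exact Or.inl (Or.inl (h ▸ hc))
          · exact Or.inr (Or.inl ⟨u, h, hc⟩)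
        · rcases List.mem_cons.mp hp with h | h
          · exact Or.inl (Or.inr (h ▸ hc))
          · exact Or.inr (Or.inr ⟨p, h, hc⟩)

-- ---- assembling B = pairsAny ----
lemma toList_injective : Function.Injective String.toList :=
  fun _ _ h => String.toList_inj.mp h

set_option maxHeartbeats 4000000 in
lemma alt_eq_pairsAny (statement : String) :
    can_modify_database_alt statement =
      pairsAny (PySem.Str.split₀ (PySem.Str.strip (PySem.Str.lower statement))) := by
  unfold can_modify_database_alt
  set s0 := PySem.Str.strip (PySem.Str.lower statement) with hs0
  set ws := PySem.Str.split₀ s0 with hws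
  set text := " " ++ PySem.Str.join " " ws ++ " " with htext
  clear_value text ws s0
  have hL : ws.map String.toList = PySem.Chars.split₀ s0.toList := by rw [hws]; exact PySem.Str.split₀_map_toList s0
  have hgood : ∀ w ∈ ws.map String.toList, goodTok w := by
    rw [hL]; exact split₀_good _
  cases hwe : ws with
  | nil =>
    rw [htext, hwe]
    decide
  | cons w0 t0 =>
    have hwne : ws ≠ [] := by rw [hwe]; simp
    have htl : text.toList = ' ' :: uJoin (ws.map String.toList) := by
      rw [htext]
      simp only [String.toList_append, PySem.Str.toList_join]
      rw [show (" " : String).toList = [' '] from rfl, List.append_assoc,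
        join_pad (ws.map String.toList) (by simpa using hwne)]
      rw [List.singleton_append]
    apply Bool.coe_iff_coe.mp
    have H1 : ∀ (p k : String), p.toList = ' ' :: k.toList ++ [' '] →
        ' ' ∉ k.toList →
        (PySem.Str.isIn p text = true ↔ k ∈ ws) := by
      intro p k hp hk2
      rw [PySem.Str.isIn_iff_infix, hp, htl,
        one_tok_infix k.toList hk2 (ws.map String.toList) hgood]
      exact List.mem_map_of_injective toList_injective
    have H2 : ∀ (p k1 k2 : String),
        p.toList = ' ' :: k1.toList ++ ' ' :: k2.toList ++ [' '] →
        ' ' ∉ k1.toList → ' ' ∉ k2.toList →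
        (PySem.Str.isIn p text = true ↔ (k1, k2) ∈ ws.zip ws.tail) := by
      intro p k1 k2 hp hk1 hk3
      rw [PySem.Str.isIn_iff_infix, hp, htl,
        two_tok_infix k1.toList k2.toList hk1 hk3 (ws.map String.toList) hgood]
      rw [← List.map_tail, List.zip_map]
      have : ((k1, k2) : String × String).map String.toList String.toList =
          (k1.toList, k2.toList) := rfl
      rw [← this]
      exact List.mem_map_of_injective (toList_injective.prodMap toList_injective)
    simp only [modPhrases, List.any_cons, List.any_nil, Bool.or_eq_true, Bool.false_eq_true, or_false]
    rw [H1 " delete " "delete" (by decide) (by decide),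
        H1 " grant " "grant" (by decide) (by decide),
        H1 " revoke " "revoke" (by decide) (by decide),
        H1 " commit " "commit" (by decide) (by decide),
        H1 " rollback " "rollback" (by decide) (by decide),
        H1 " savepoint " "savepoint" (by decide) (by decide),
        H1 " update " "update" (by decide) (by decide),
        H2 " alter table " "alter" "table" (by decide) (by decide) (by decide),
        H2 " create database " "create" "database" (by decide) (by decide) (by decide),
        H2 " create table " "create" "table" (by decide) (by decide) (by decide),
        H2 " create index " "create" "index" (by decide) (by decide) (by decide),
        H2 " create view " "create" "view" (by decide) (by decide) (by decide),
        H2 " drop database " "drop" "database" (by decide) (by decide) (by decide),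
        H2 " drop index " "drop" "index" (by decide) (by decide) (by decide),
        H2 " drop table " "drop" "table" (by decide) (by decide) (by decide),
        H2 " insert into " "insert" "into" (by decide) (by decide) (by decide),
        H2 " truncate table " "truncate" "table" (by decide) (by decide) (by decide),
        ← hwe, pairsAny_iff ws]
    have hbare : (bareKeywords : List String) =
        ["delete", "grant", "revoke", "commit", "rollback", "savepoint", "update"] := by rfl
    have hpair : (pairKeywords : List (String × String)) =
        [("alter", "table"), ("create", "database"), ("create", "table"), ("create", "index"),
         ("create", "view"), ("drop", "database"), ("drop", "index"), ("drop", "table"),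
         ("insert", "into"), ("truncate", "table")] := by rfl
    constructor
    · rintro (h|h|h|h|h|h|h|h|h|h|h|h|h|h|h|h|h)
      · exact Or.inl ⟨"delete", h, by decide⟩
      · exact Or.inl ⟨"grant", h, by decide⟩
      · exact Or.inl ⟨"revoke", h, by decide⟩
      · exact Or.inl ⟨"commit", h, by decide⟩
      · exact Or.inl ⟨"rollback", h, by decide⟩
      · exact Or.inl ⟨"savepoint", h, by decide⟩
      · exact Or.inl ⟨"update", h, by decide⟩
      · exact Or.inr ⟨("alter", "table"), h, by decide⟩
      · exact Or.inr ⟨("create", "database"), h, by decide⟩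
      · exact Or.inr ⟨("create", "table"), h, by decide⟩
      · exact Or.inr ⟨("create", "index"), h, by decide⟩
      · exact Or.inr ⟨("create", "view"), h, by decide⟩
      · exact Or.inr ⟨("drop", "database"), h, by decide⟩
      · exact Or.inr ⟨("drop", "index"), h, by decide⟩
      · exact Or.inr ⟨("drop", "table"), h, by decide⟩
      · exact Or.inr ⟨("insert", "into"), h, by decide⟩
      · exact Or.inr ⟨("truncate", "table"), h, by decide⟩
    · rintro (⟨u, hu, hc⟩ | ⟨p, hp, hc⟩)
      · rw [PySem.Set.contains_iff, hbare] at hc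
        simp only [List.mem_cons, List.not_mem_nil, or_false] at hc
        rcases hc with (rfl|rfl|rfl|rfl|rfl|rfl|rfl) <;> tauto
      · rw [PySem.Set.contains_iff, hpair] at hc
        simp only [List.mem_cons, List.not_mem_nil, or_false] at hc
        rcases hc with (rfl|rfl|rfl|rfl|rfl|rfl|rfl|rfl|rfl|rfl) <;> tauto

-- ===== VERDICT (by name: the statement is the Claim_ definition above) =====
theorem can_modify_database_spec : Claim_equal_can_modify_database := by
  intro statement _
  unfold Spec_can_modify_database can_modify_database
  rw [alt_eq_pairsAny]
  exact loop_eq (PySem.Str.split₀ (PySem.Str.strip (PySem.Str.lower statement)))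
    (PySem.Str.split₀ (PySem.Str.strip (PySem.Str.lower statement))) 0 (by simp)
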